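-- pv_equiv track=rewrite | github.com/audi/nucleus7 | nucleus7/utils/project_utils.py | _update_list_subconfigs
-- ===== SOURCE A (Python) =====
-- _CONFIG_LIST_INSERT_IDENTIFIER = "__BASE__"
--
-- def _update_list_subconfigs(config1: list, config2: list) -> list:
--     if not isinstance(config1, (list, tuple)):
--         config1 = [config1]
--     if not isinstance(config2, (list, tuple)):
--         config2 = [config2]
--
--     if _CONFIG_LIST_INSERT_IDENTIFIER in config1:
--         config1 = list(config1)
--         config1.remove(_CONFIG_LIST_INSERT_IDENTIFIER)
--
--     try:
--         base_index = config2.index(_CONFIG_LIST_INSERT_IDENTIFIER)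
--     except ValueError:
--         base_index = -1
--     if base_index == -1:
--         return config2
--
--     config_updated = list(config2)
--     config_updated.remove(_CONFIG_LIST_INSERT_IDENTIFIER)
--     for each_item in config1[::-1]:
--         config_updated.insert(base_index, each_item)
--     return config_updated
-- ===== SOURCE B (Python) =====
-- _CONFIG_LIST_INSERT_IDENTIFIER = "__BASE__"
--
-- def _update_list_subconfigs(config1: list, config2: list) -> list:
--     if not isinstance(config1, (list, tuple)):
--         config1 = [config1]
--     if not isinstance(config2, (list, tuple)):
--         config2 = [config2]
--
--     # strip the first __BASE__ from config1 in one pass with a flag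
--     stripped = []
--     removed = False
--     for x in config1:
--         if not removed and x == _CONFIG_LIST_INSERT_IDENTIFIER:
--             removed = True
--         else:
--             stripped.append(x)
--
--     # single forward pass over config2, splicing at the first marker only
--     result = []
--     spliced = False
--     for item in config2:
--         if not spliced and item == _CONFIG_LIST_INSERT_IDENTIFIER:
--             result.extend(stripped)
--             spliced = True
--         else:
--             result.append(item)
--     return result if spliced else config2
-- ===== Notes on version B (the rewrite author's own statement) =====
-- stated objective: simpler
-- what changed: Replaces A's index-lookup + list copy + remove + reversed repeated insert-at-index with two single forward flag-passes (strip first marker from config1, splice config1 at the first marker of config2), never moving elements after the insertion point.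
import Mathlib
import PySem

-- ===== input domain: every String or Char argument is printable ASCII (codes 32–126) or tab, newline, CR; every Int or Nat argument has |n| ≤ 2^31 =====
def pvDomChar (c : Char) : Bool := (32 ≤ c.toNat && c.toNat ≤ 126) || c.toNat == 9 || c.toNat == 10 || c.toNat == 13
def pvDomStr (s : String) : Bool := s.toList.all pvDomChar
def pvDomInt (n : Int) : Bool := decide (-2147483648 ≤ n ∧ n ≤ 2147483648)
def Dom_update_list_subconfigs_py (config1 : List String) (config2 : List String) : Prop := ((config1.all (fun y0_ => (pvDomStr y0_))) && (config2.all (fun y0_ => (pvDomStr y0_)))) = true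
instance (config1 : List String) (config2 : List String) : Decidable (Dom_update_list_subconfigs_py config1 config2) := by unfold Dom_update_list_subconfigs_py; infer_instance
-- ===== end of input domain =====

-- B replaces A's index-lookup + copy + remove + reversed insert-at-index with two single
-- forward flag-passes (simpler decomposition, same return value).

-- ===== PORT A =====
-- Literal port of _update_list_subconfigs (the isinstance normalisation is a no-op on List String).
def update_list_subconfigs_py (config1 : List String) (config2 : List String) : List String :=
  -- if "__BASE__" in config1: config1 = list(config1); config1.remove("__BASE__")
  let config1' : List String :=
    if "__BASE__" ∈ config1 then (PySem.List.remove? config1 "__BASE__").getD config1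
    else config1
  -- try: base_index = config2.index(...) except ValueError: base_index = -1
  match PySem.List.index? config2 "__BASE__" with
  | none => config2
  | some base_index =>
    -- config_updated = list(config2); config_updated.remove("__BASE__")
    let config_updated : List String := (PySem.List.remove? config2 "__BASE__").getD config2
    -- for each_item in config1[::-1]: config_updated.insert(base_index, each_item)
    (((PySem.List.slice? config1' none none (-1)).getD []).foldl
      (fun acc item => PySem.List.insert acc (base_index : Int) item) config_updated)

-- ===== PORT B =====
-- loop bodies of Source B's two flag-passes, named
def pvStep1 (st : List String × Bool) (x : String) : List String × Bool :=
  if !st.2 && (x == "__BASE__") then (st.1, true) else (st.1 ++ [x], st.2)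

def pvStep2 (S : List String) (st : List String × Bool) (item : String) : List String × Bool :=
  if !st.2 && (item == "__BASE__") then (st.1 ++ S, true) else (st.1 ++ [item], st.2)

def update_list_subconfigs_py_alt (config1 : List String) (config2 : List String) : List String :=
  -- strip first "__BASE__" from config1 with a flag
  let s := config1.foldl pvStep1 ([], false)
  -- single forward pass over config2, splicing at the first marker only
  let r := config2.foldl (pvStep2 s.1) ([], false)
  if r.2 then r.1 else config2

-- ===== PRECONDITION & SPEC =====
def Spec_update_list_subconfigs_py (config1 : List String) (config2 : List String) (out : List String) : Prop := out = update_list_subconfigs_py_alt config1 config2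
instance (config1 : List String) (config2 : List String) (out : List String) : Decidable (Spec_update_list_subconfigs_py config1 config2 out) := by unfold Spec_update_list_subconfigs_py; infer_instance

-- ===== CLAIM (what is proved, stated in full; the proofs are below) =====
def Claim_equal_update_list_subconfigs_py : Prop := ∀ (config1 : List String) (config2 : List String), Dom_update_list_subconfigs_py config1 config2 → Spec_update_list_subconfigs_py config1 config2 (update_list_subconfigs_py config1 config2)

-- ===== LEMMAS AND PROOFS =====

theorem pvStep1_foldl_true (xs : List String) (acc : List String) :
    xs.foldl pvStep1 (acc, true) = (acc ++ xs, true) := by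
  induction xs generalizing acc with
  | nil => simp
  | cons x xs ih => simp [pvStep1, List.foldl_cons, ih]

theorem pvStep1_foldl_false (xs : List String) (acc : List String) :
    xs.foldl pvStep1 (acc, false) = (acc ++ xs.erase "__BASE__", decide ("__BASE__" ∈ xs)) := by
  induction xs generalizing acc with
  | nil => simp
  | cons x xs ih =>
    by_cases hx : x = "__BASE__"
    · subst hx
      simp [pvStep1, List.foldl_cons, pvStep1_foldl_true]
    · rw [List.foldl_cons]
      have : pvStep1 (acc, false) x = (acc ++ [x], false) := by
        simp [pvStep1, hx]
      rw [this, ih]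
      simp [hx]
      exact fun e => absurd e.symm hx

theorem pvStep2_foldl_true (S xs acc : List String) :
    xs.foldl (pvStep2 S) (acc, true) = (acc ++ xs, true) := by
  induction xs generalizing acc with
  | nil => simp
  | cons x xs ih => simp [pvStep2, List.foldl_cons, ih]

theorem pvStep2_foldl_notmem (S xs acc : List String) (h : "__BASE__" ∉ xs) :
    xs.foldl (pvStep2 S) (acc, false) = (acc ++ xs, false) := by
  induction xs generalizing acc with
  | nil => simp
  | cons x xs ih =>
    have hx : x ≠ "__BASE__" := fun e => h (e ▸ List.mem_cons_self ..)
    rw [List.foldl_cons]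
    have : pvStep2 S (acc, false) x = (acc ++ [x], false) := by
      simp [pvStep2, hx]
    rw [this, ih (acc ++ [x]) (fun hm => h (List.mem_cons_of_mem _ hm))]
    simp

theorem pvStep2_foldl_split (S pre suf acc : List String) (hpre : "__BASE__" ∉ pre) :
    (pre ++ "__BASE__" :: suf).foldl (pvStep2 S) (acc, false)
      = (acc ++ pre ++ S ++ suf, true) := by
  rw [List.foldl_append, pvStep2_foldl_notmem S pre acc hpre, List.foldl_cons]
  have : pvStep2 S (acc ++ pre, false) "__BASE__" = (acc ++ pre ++ S, true) := by
    simp [pvStep2]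
  rw [this, pvStep2_foldl_true]

-- A's reversed insert loop plants the list's reverse at position pre.length
theorem insert_foldl_reverse (l pre rest : List String) :
    l.foldl (fun acc item => PySem.List.insert acc ((pre.length : Nat) : Int) item) (pre ++ rest)
      = pre ++ l.reverse ++ rest := by
  induction l generalizing rest with
  | nil => simp
  | cons x l ih =>
    rw [List.foldl_cons]
    have hins : PySem.List.insert (pre ++ rest) ((pre.length : Nat) : Int) x
        = pre ++ x :: rest := by
      rw [PySem.List.insert_natCast _ _ _ (by simp)]
      simp
    rw [hins, ih (x :: rest)]
    simp

-- A's stripped config1 equals B's flag-pass result: both are erase of the first marker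
theorem configA_strip (c1 : List String) :
    (if "__BASE__" ∈ c1 then (PySem.List.remove? c1 "__BASE__").getD c1 else c1)
      = c1.erase "__BASE__" := by
  by_cases h : "__BASE__" ∈ c1
  · simp [h, PySem.List.remove?_eq_some_erase _ _ h]
  · simp [h, List.erase_of_not_mem h]

-- ===== VERDICT (by name: the statement is the Claim_ definition above) =====
theorem update_list_subconfigs_py_spec : Claim_equal_update_list_subconfigs_py := by
  intro c1 c2 _
  unfold Spec_update_list_subconfigs_py update_list_subconfigs_py update_list_subconfigs_py_alt
  rw [pvStep1_foldl_false c1 []]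
  simp only [List.nil_append]
  rcases hidx : PySem.List.index? c2 "__BASE__" with _ | k
  · -- no marker in config2: both return config2
    have hnm : "__BASE__" ∉ c2 := (PySem.List.index?_eq_none_iff ..).mp hidx
    rw [pvStep2_foldl_notmem _ c2 [] hnm]
    simp
  · -- marker at index k = pre.length
    obtain ⟨pre, suf, hc2, hk, hpre⟩ := (PySem.List.index?_eq_some_iff ..).mp hidx
    subst hc2
    have hmem : "__BASE__" ∈ pre ++ "__BASE__" :: suf := by simp
    have herase : (pre ++ "__BASE__" :: suf).erase "__BASE__" = pre ++ suf := by
      rw [List.erase_append_right _ hpre, List.erase_cons_head]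
    rw [pvStep2_foldl_split _ pre suf [] hpre]
    rw [configA_strip, PySem.List.remove?_eq_some_erase _ _ hmem]
    simp only [Option.getD_some, herase, PySem.List.slice?_none_none_neg_one, List.nil_append]
    rw [← hk, insert_foldl_reverse ((c1.erase "__BASE__").reverse) pre suf]
    simp
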